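-- pv_equiv track=rewrite | github.com/rgerhards/rsyslog | tests/rscript_strptime_to_rfc3339_expect.py | format_contains_directive
-- ===== SOURCE A (Python) =====
-- def format_contains_directive(fmt: str, directives: str) -> bool:
--     i = 0
--     while i < len(fmt):
--         ch = fmt[i]
--         if ch != '%':
--             i += 1
--             continue
--         i += 1
--         if i >= len(fmt):
--             break
--         ch = fmt[i]
--         if ch == '%':
--             i += 1
--             continue
--         if ch in ('E', 'O'):
--             i += 1
--             if i >= len(fmt):
--                 break
--             ch = fmt[i]
--         if ch in directives:
--             return True
--         i += 1
--     return False
-- ===== SOURCE B (Python) =====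
-- import re
--
-- # Every %-sequence: '%' followed by either a literal '%', or an optional E/O
-- # modifier and the (optional, possibly newline) directive character.
-- _DIRECTIVE_RE = re.compile(r'%(%|[EO]?.?)', re.DOTALL)
--
--
-- def _effective(group: str):
--     """Effective directive char of a %-sequence, or None for %%/truncated ones."""
--     if len(group) == 2:          # E/O modifier + directive char
--         return group[1]
--     if group in ('', '%', 'E', 'O'):   # trailing %, escaped %%, trailing %E/%O
--         return None
--     return group
--
--
-- def format_contains_directive(fmt: str, directives: str) -> bool:
--     for m in _DIRECTIVE_RE.finditer(fmt):
--         ch = _effective(m.group(1))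
--         if ch is not None and ch in directives:
--             return True
--     return False
-- ===== Notes on version B (the rewrite author's own statement) =====
-- stated objective: idiomatic
-- what changed: Replaced A's hand-written index-based while-loop state machine by library pattern matching: a compiled regex %(%|[EO]?.?) with re.DOTALL enumerates the %-sequences via finditer, and a small pure function maps each match group to its effective directive char (None for %%, trailing % and trailing %E/%O) before the membership test; the scan runs in the C regex engine instead of the Python interpreter.
import Mathlib
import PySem

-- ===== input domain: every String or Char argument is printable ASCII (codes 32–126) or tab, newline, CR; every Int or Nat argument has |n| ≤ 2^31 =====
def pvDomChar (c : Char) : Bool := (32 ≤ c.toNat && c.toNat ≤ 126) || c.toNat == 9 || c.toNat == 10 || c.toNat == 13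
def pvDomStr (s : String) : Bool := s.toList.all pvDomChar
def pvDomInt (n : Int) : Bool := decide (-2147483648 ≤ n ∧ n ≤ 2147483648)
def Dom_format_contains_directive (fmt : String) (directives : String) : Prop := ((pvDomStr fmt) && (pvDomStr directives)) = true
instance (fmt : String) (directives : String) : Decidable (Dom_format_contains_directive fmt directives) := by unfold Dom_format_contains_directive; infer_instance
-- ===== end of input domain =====

-- B replaces A's hand-written index-based while-loop state machine by regex
-- pattern matching: re.finditer(r'%(%|[EO]?.?)', fmt, re.DOTALL) enumerates the
-- %-sequences and a small pure function maps each group to its effective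
-- directive char before the membership test (objective: idiomatic).

-- ===== PORT A =====
-- A's while-loop over index i; fmt[i] is always in range where A reads it, so getD is exact.
def pvLoopA (cs : List Char) (ds : List Char) (i : Nat) : Bool :=
  if i < cs.length then
    if cs.getD i ' ' ≠ '%' then pvLoopA cs ds (i + 1)
    else if i + 1 ≥ cs.length then false
    else if cs.getD (i + 1) ' ' = '%' then pvLoopA cs ds (i + 2)
    else if cs.getD (i + 1) ' ' = 'E' ∨ cs.getD (i + 1) ' ' = 'O' then
      if i + 2 ≥ cs.length then false
      else if ds.contains (cs.getD (i + 2) ' ') then true else pvLoopA cs ds (i + 3)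
    else if ds.contains (cs.getD (i + 1) ' ') then true else pvLoopA cs ds (i + 2)
  else false
termination_by cs.length - i

def format_contains_directive (fmt : String) (directives : String) : Bool :=
  pvLoopA fmt.toList directives.toList 0

-- ===== PORT B =====
-- Hand-written, exact emulation of the Python regex engine on the fixed pattern
-- %(%|[EO]?.?) with re.DOTALL: finditer scans left to right for the leftmost
-- non-overlapping matches; at each '%' the group is the literal '%' alternative
-- if one follows, else a greedy optional E/O modifier plus a greedy optional
-- arbitrary character (DOTALL: '.' also matches '\n'). pvFinditer returns the
-- group-1 strings of the successive matches, in order.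
def pvFinditer : List Char → List (List Char)
  | [] => []
  | c :: rest =>
    if c ≠ '%' then pvFinditer rest          -- regex search advances past non-matching positions
    else
      match rest with
      | [] => [[]]                            -- group matches empty at end of string
      | d :: rest2 =>
        if d = '%' then ['%'] :: pvFinditer rest2
        else if d = 'E' ∨ d = 'O' then
          match rest2 with
          | [] => [[d]]                       -- lone modifier at end of string
          | c2 :: rest3 => [d, c2] :: pvFinditer rest3
        else [d] :: pvFinditer rest2

-- _effective of Source B: the effective directive char of a match group, or none.
def pvEffective : List Char → Option Char
  | [d, c] => some c
  | g => if g = [] ∨ g = ['%'] ∨ g = ['E'] ∨ g = ['O'] then none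
         else match g with | d :: _ => some d | [] => none

def format_contains_directive_alt (fmt : String) (directives : String) : Bool :=
  (pvFinditer fmt.toList).any (fun g =>
    match pvEffective g with
    | some c => directives.toList.contains c
    | none => false)

-- ===== PRECONDITION & SPEC =====
def Spec_format_contains_directive (fmt : String) (directives : String) (out : Bool) : Prop := out = format_contains_directive_alt fmt directives
instance (fmt : String) (directives : String) (out : Bool) : Decidable (Spec_format_contains_directive fmt directives out) := by unfold Spec_format_contains_directive; infer_instance

-- ===== CLAIM (what is proved, stated in full; the proofs are below) =====
def Claim_equal_format_contains_directive : Prop := ∀ (fmt : String) (directives : String), Dom_format_contains_directive fmt directives → Spec_format_contains_directive fmt directives (format_contains_directive fmt directives)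

-- ===== LEMMAS AND PROOFS =====

def pvHit (ds : List Char) (g : List Char) : Bool :=
  match pvEffective g with
  | some c => ds.contains c
  | none => false

-- Rewrite rules for pvFinditer on the shapes A's loop exposes.
theorem pvFI_nil : pvFinditer [] = [] := rfl

theorem pvFI_not_pct (c : Char) (h : ¬ c = '%') (rest : List Char) :
    pvFinditer (c :: rest) = pvFinditer rest := by
  rw [pvFinditer.eq_def]; simp [h]

theorem pvFI_pct_end : pvFinditer ['%'] = [[]] := by
  rw [pvFinditer.eq_def]; simp

theorem pvFI_pct_pct (rest : List Char) :
    pvFinditer ('%' :: '%' :: rest) = ['%'] :: pvFinditer rest := by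
  rw [pvFinditer.eq_def]; simp

theorem pvFI_pct_eo_end (d : Char) (h : d = 'E' ∨ d = 'O') :
    pvFinditer ['%', d] = [[d]] := by
  rcases h with h | h <;> subst h <;> (rw [pvFinditer.eq_def]; simp)

theorem pvFI_pct_eo (d : Char) (h : d = 'E' ∨ d = 'O') (c : Char) (rest : List Char) :
    pvFinditer ('%' :: d :: c :: rest) = [d, c] :: pvFinditer rest := by
  rcases h with h | h <;> subst h <;> (rw [pvFinditer.eq_def]; simp)

theorem pvFI_pct_other (d : Char) (h1 : ¬ d = '%') (h2 : ¬ (d = 'E' ∨ d = 'O'))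
    (rest : List Char) :
    pvFinditer ('%' :: d :: rest) = [d] :: pvFinditer rest := by
  rw [pvFinditer.eq_def]; simp [h1, h2]

-- pvHit on the group shapes.
theorem pvHit_empty (ds : List Char) : pvHit ds [] = false := rfl

theorem pvHit_pct (ds : List Char) : pvHit ds ['%'] = false := rfl

theorem pvHit_eo (ds : List Char) (d : Char) (h : d = 'E' ∨ d = 'O') :
    pvHit ds [d] = false := by
  rcases h with h | h <;> subst h <;> rfl

theorem pvHit_pair (ds : List Char) (d c : Char) : pvHit ds [d, c] = ds.contains c := rfl

theorem pvHit_single (ds : List Char) (d : Char) (h1 : ¬ d = '%')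
    (h2 : ¬ (d = 'E' ∨ d = 'O')) : pvHit ds [d] = ds.contains d := by
  unfold pvHit pvEffective
  have h3 : d = 'E' → False := fun h => h2 (Or.inl h)
  have h4 : d = 'O' → False := fun h => h2 (Or.inr h)
  simp [h1, h2]

theorem alt_eq_any (fmt : String) (ds : String) :
    format_contains_directive_alt fmt ds
      = (pvFinditer fmt.toList).any (pvHit ds.toList) := rfl

-- A's loop from index i equals B's regex pipeline on the suffix cs.drop i.
theorem pvLoopA_eq_alt (cs ds : List Char) :
    ∀ i, pvLoopA cs ds i = (pvFinditer (cs.drop i)).any (pvHit ds) := by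
  intro i
  induction hn : cs.length - i using Nat.strong_induction_on generalizing i with
  | _ n ih =>
  subst hn
  rw [pvLoopA]
  by_cases hi : i < cs.length
  · have IH : ∀ j, i < j → pvLoopA cs ds j = (pvFinditer (cs.drop j)).any (pvHit ds) :=
      fun j hj => ih (cs.length - j) (by omega) j rfl
    have hdrop : cs.drop i = cs.getD i ' ' :: cs.drop (i + 1) := by
      rw [List.drop_eq_getElem_cons hi]
      simp [List.getD_eq_getElem?_getD, List.getElem?_eq_getElem hi]
    rw [if_pos hi]
    by_cases h1 : cs.getD i ' ' = '%'
    · rw [if_neg (not_not_intro h1)]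
      by_cases h2 : i + 1 ≥ cs.length
      · rw [if_pos h2, hdrop, h1, List.drop_eq_nil_of_le h2, pvFI_pct_end]
        simp only [List.any_cons, List.any_nil, Bool.or_false]
        exact pvHit_empty ds
      · have h2' : i + 1 < cs.length := by omega
        have hdrop2 : cs.drop (i + 1) = cs.getD (i + 1) ' ' :: cs.drop (i + 2) := by
          rw [List.drop_eq_getElem_cons h2']
          simp [List.getD_eq_getElem?_getD, List.getElem?_eq_getElem h2']
        rw [if_neg h2]
        by_cases h3 : cs.getD (i + 1) ' ' = '%'
        · rw [if_pos h3, hdrop, hdrop2, h1, h3, pvFI_pct_pct, List.any_cons,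
            pvHit_pct, Bool.false_or, IH (i + 2) (by omega)]
        · by_cases h4 : cs.getD (i + 1) ' ' = 'E' ∨ cs.getD (i + 1) ' ' = 'O'
          · rw [if_neg h3, if_pos h4]
            by_cases h5 : i + 2 ≥ cs.length
            · rw [if_pos h5, hdrop, hdrop2, h1, List.drop_eq_nil_of_le h5,
                pvFI_pct_eo_end _ h4]
              simp only [List.any_cons, List.any_nil, Bool.or_false]
              exact (pvHit_eo ds _ h4).symm
            · have h5' : i + 2 < cs.length := by omega
              have hdrop3 : cs.drop (i + 2) = cs.getD (i + 2) ' ' :: cs.drop (i + 3) := by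
                rw [List.drop_eq_getElem_cons h5']
                simp [List.getD_eq_getElem?_getD, List.getElem?_eq_getElem h5']
              rw [if_neg h5, hdrop, hdrop2, hdrop3, h1, pvFI_pct_eo _ h4,
                List.any_cons, pvHit_pair]
              by_cases h6 : ds.contains (cs.getD (i + 2) ' ') = true
              · rw [if_pos h6, h6, Bool.true_or]
              · have h6' : ds.contains (cs.getD (i + 2) ' ') = false := by
                  revert h6; cases ds.contains (cs.getD (i + 2) ' ') <;> simp
                rw [if_neg h6, h6', Bool.false_or, IH (i + 3) (by omega)]
          · rw [if_neg h3, if_neg h4, hdrop, hdrop2, h1,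
              pvFI_pct_other _ h3 h4, List.any_cons, pvHit_single ds _ h3 h4]
            by_cases h6 : ds.contains (cs.getD (i + 1) ' ') = true
            · rw [if_pos h6, h6, Bool.true_or]
            · have h6' : ds.contains (cs.getD (i + 1) ' ') = false := by
                revert h6; cases ds.contains (cs.getD (i + 1) ' ') <;> simp
              rw [if_neg h6, h6', Bool.false_or, IH (i + 2) (by omega)]
    · rw [if_pos h1, hdrop, pvFI_not_pct _ h1, IH (i + 1) (by omega)]
  · rw [if_neg hi, List.drop_eq_nil_of_le (by omega), pvFI_nil]
    rfl

-- ===== VERDICT (by name: the statement is the Claim_ definition above) =====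
theorem format_contains_directive_spec : Claim_equal_format_contains_directive := by
  intro fmt directives _
  unfold Spec_format_contains_directive format_contains_directive
  rw [alt_eq_any]
  exact pvLoopA_eq_alt fmt.toList directives.toList 0
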